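-- pv_equiv track=rewrite | github.com/Nickotronz7/LightBotCC | src/MathExpSolver.py | sortOps
-- ===== SOURCE A (Python) =====
-- def getOpType(op):
--     type1 = ['/','*']
--     if op in type1:
--         return 1
--     else:
--         return 0
--
-- def sortOps(string, opsList):
--     type1 = []
--     type2 = []
--     for i in opsList:
--         if getOpType(string[i]):
--             type1 += [i]
--         else:
--             type2 += [i]
--     type1 += type2
--     return type1
-- ===== SOURCE B (Python) =====
-- def sortOps(string, opsList):
--     # stable sort: high-precedence ('/', '*') indices first, each group in original order
--     return sorted(opsList, key=lambda i: 0 if string[i] in '/*' else 1)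
-- ===== Notes on version B (the rewrite author's own statement) =====
-- stated objective: idiomatic
-- what changed: Replaced the explicit two-accumulator partition loop with a single stable sorted() call on a 2-valued precedence key; stability preserves the original relative order within each group.
import Mathlib
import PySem

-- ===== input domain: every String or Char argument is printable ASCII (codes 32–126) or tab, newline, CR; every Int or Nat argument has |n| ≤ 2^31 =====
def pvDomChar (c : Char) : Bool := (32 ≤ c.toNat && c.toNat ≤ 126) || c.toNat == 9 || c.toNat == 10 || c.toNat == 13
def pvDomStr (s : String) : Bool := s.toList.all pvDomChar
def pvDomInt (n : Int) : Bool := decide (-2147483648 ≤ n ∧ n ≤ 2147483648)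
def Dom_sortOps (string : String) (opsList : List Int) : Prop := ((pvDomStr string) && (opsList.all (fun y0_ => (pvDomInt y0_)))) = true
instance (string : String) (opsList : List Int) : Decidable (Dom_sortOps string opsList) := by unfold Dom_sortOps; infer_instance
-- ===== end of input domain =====

-- B replaces A's two-accumulator partition loop by one stable sort on a 2-valued key (idiomatic, not faster).

-- ===== PORT A =====
def getOpType (op : Char) : Int :=
  if op = '/' ∨ op = '*' then 1 else 0

def sortOps (string : String) (opsList : List Int) : List Int :=
  -- string[i] raises IndexError outside range; Pre_sortOps excludes that, the port defaults to ' '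
  let st := opsList.foldl
    (fun (acc : List Int × List Int) i =>
      if getOpType ((PySem.Str.pyGet? string i).getD ' ') ≠ 0 then (acc.1 ++ [i], acc.2)
      else (acc.1, acc.2 ++ [i]))
    ([], [])
  st.1 ++ st.2

-- ===== PORT B =====
def sortOps_alt (string : String) (opsList : List Int) : List Int :=
  PySem.List.sorted opsList
    (fun i => if (PySem.Str.pyGet? string i).getD ' ' = '/' ∨ (PySem.Str.pyGet? string i).getD ' ' = '*' then (0 : Int) else 1)
    false

-- ===== PRECONDITION & SPEC =====
-- Pre_ excludes exactly the inputs where Python's string[i] raises IndexError (index out of range).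
def Pre_sortOps (string : String) (opsList : List Int) : Prop :=
  ∀ i ∈ opsList, -(PySem.Str.len string) ≤ i ∧ i < PySem.Str.len string
instance (string : String) (opsList : List Int) : Decidable (Pre_sortOps string opsList) := by
  unfold Pre_sortOps; infer_instance
def pvWitness_sortOps : String × List Int := ("1*2/3", [1, 3])

def Spec_sortOps (string : String) (opsList : List Int) (out : List Int) : Prop := out = sortOps_alt string opsList
instance (string : String) (opsList : List Int) (out : List Int) : Decidable (Spec_sortOps string opsList out) := by unfold Spec_sortOps; infer_instance

-- ===== CLAIM (what is proved, stated in full; the proofs are below) =====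
def Claim_equal_sortOps : Prop := ∀ (string : String) (opsList : List Int), Dom_sortOps string opsList → Pre_sortOps string opsList → Spec_sortOps string opsList (sortOps string opsList)

-- ===== LEMMAS AND PROOFS =====

-- inserting a 0-key element into a (0-keys ++ 1-keys) list lands between the groups
theorem insertBy_key_zero (key : Int → Int) (x : Int) (A0 A1 : List Int)
    (hA0 : ∀ a ∈ A0, key a = 0) (hA1 : ∀ a ∈ A1, key a = 1) (hx : key x = 0) :
    PySem.List.insertBy (fun a b => decide (key a < key b)) x (A0 ++ A1) = A0 ++ x :: A1 := by
  induction A0 with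
  | nil =>
    cases A1 with
    | nil => simp [PySem.List.insertBy]
    | cons y ys =>
      have hy := hA1 y (by simp)
      simp [PySem.List.insertBy, hx, hy]
  | cons a A0 ih =>
    have ha := hA0 a (by simp)
    simp only [List.cons_append, PySem.List.insertBy, hx, ha]
    rw [if_neg (by simp)]
    simp [ih (fun b hb => hA0 b (by simp [hb]))]

-- inserting a 1-key element into a list of keys ≤ 1 appends it at the end
theorem insertBy_key_one (key : Int → Int) (x : Int) (ys : List Int)
    (hys : ∀ a ∈ ys, key a ≤ 1) (hx : key x = 1) :
    PySem.List.insertBy (fun a b => decide (key a < key b)) x ys = ys ++ [x] := by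
  apply PySem.List.insertBy_of_forall_not_before
  intro y hy
  have := hys y hy
  simp [hx]; omega

-- the stable insertion-sort fold over a 0/1-valued key keeps the partition invariant
theorem foldl_insertBy_partition (key : Int → Int) (hkey : ∀ i, key i = 0 ∨ key i = 1) :
    ∀ (xs A0 A1 : List Int), (∀ a ∈ A0, key a = 0) → (∀ a ∈ A1, key a = 1) →
      xs.foldl (fun acc x => PySem.List.insertBy (fun a b => decide (key a < key b)) x acc) (A0 ++ A1)
      = (A0 ++ xs.filter (fun i => key i == 0)) ++ (A1 ++ xs.filter (fun i => !(key i == 0))) := by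
  intro xs
  induction xs with
  | nil => intro A0 A1 _ _; simp
  | cons x xs ih =>
    intro A0 A1 hA0 hA1
    rcases hkey x with hx | hx
    · rw [List.foldl_cons, insertBy_key_zero key x A0 A1 hA0 hA1 hx]
      have := ih (A0 ++ [x]) A1
        (by intro a ha; rcases List.mem_append.1 ha with h | h
            · exact hA0 a h
            · simp at h; simpa [h] using hx) hA1
      rw [show A0 ++ x :: A1 = (A0 ++ [x]) ++ A1 by simp, this]
      simp [List.filter_cons, hx]
    · rw [List.foldl_cons, insertBy_key_one key x (A0 ++ A1)
        (by intro a ha; rcases List.mem_append.1 ha with h | h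
            · simp [hA0 a h]
            · simp [hA1 a h]) hx]
      have := ih A0 (A1 ++ [x]) hA0
        (by intro a ha; rcases List.mem_append.1 ha with h | h
            · exact hA1 a h
            · simp at h; simpa [h] using hx)
      rw [show (A0 ++ A1) ++ [x] = A0 ++ (A1 ++ [x]) by simp, this]
      simp [List.filter_cons, hx]

-- B's stable sort on a 0/1 key is exactly "0-keys then 1-keys, each in original order"
theorem sorted_partition (key : Int → Int) (hkey : ∀ i, key i = 0 ∨ key i = 1) (xs : List Int) :
    PySem.List.sorted xs key false
      = xs.filter (fun i => key i == 0) ++ xs.filter (fun i => !(key i == 0)) := by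
  rw [PySem.List.sorted_eq_foldl_insertBy]
  have := foldl_insertBy_partition key hkey xs [] [] (by simp) (by simp)
  simpa using this

-- A's fold with two accumulators is the same partition
theorem sortOps_foldl (f : Int → Char) :
    ∀ (xs : List Int) (a0 a1 : List Int),
      xs.foldl (fun (acc : List Int × List Int) i =>
        if getOpType (f i) ≠ 0 then (acc.1 ++ [i], acc.2)
        else (acc.1, acc.2 ++ [i])) (a0, a1)
      = (a0 ++ xs.filter (fun i => getOpType (f i) ≠ 0),
         a1 ++ xs.filter (fun i => !(getOpType (f i) ≠ 0))) := by
  intro xs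
  induction xs with
  | nil => intro a0 a1; simp
  | cons x xs ih =>
    intro a0 a1
    by_cases hx : getOpType (f x) ≠ 0
    · rw [List.foldl_cons, if_pos hx, ih, List.filter_cons, List.filter_cons]
      simp [hx]
    · rw [List.foldl_cons, if_neg hx, ih, List.filter_cons, List.filter_cons]
      simp [hx]

-- ===== VERDICT (by name: the statement is the Claim_ definition above) =====
theorem sortOps_spec : Claim_equal_sortOps := by
  intro string opsList _ _
  unfold Spec_sortOps sortOps sortOps_alt
  set c : Int → Char := fun i => (PySem.Str.pyGet? string i).getD ' ' with hc
  set key : Int → Int := fun i => if c i = '/' ∨ c i = '*' then (0 : Int) else 1 with hkeydef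
  have hkey : ∀ i, key i = 0 ∨ key i = 1 := by
    intro i; by_cases h : c i = '/' ∨ c i = '*' <;> simp [hkeydef, h]
  rw [sorted_partition key hkey]
  rw [show (fun i => (PySem.Str.pyGet? string i).getD ' ') = c from rfl] at *
  rw [sortOps_foldl c opsList [] []]
  simp only [List.nil_append]
  have hp : ∀ i : Int, (decide (getOpType (c i) ≠ 0)) = (key i == 0) := by
    intro i; by_cases h : c i = '/' ∨ c i = '*' <;> simp [getOpType, hkeydef, h]
  congr 1
  · exact List.filter_congr (fun i _ => hp i)
  · exact List.filter_congr (fun i _ => by rw [hp i])
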